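-- pv_equiv track=rewrite | github.com/lecaotanloc289/Gumoku-AI-Minimax-AlphaBetaPruning | Gumoku.py | evaluate
-- ===== SOURCE A (Python) =====
-- def score_of_list(lis, col):
--     blank = lis.count(" ")
--     filled = lis.count(col)
--
--     if blank + filled < 5:
--         return -1
--     elif blank == 5:
--         return 0
--     else:
--         return filled
--
-- def evaluate(board, computer, human):
--     score = 0
--     # Kiểm tra các hàng
--     for i in range(len(board)):
--         row = board[i]
--         score += score_of_list(row, computer) - score_of_list(row, human)
--     # Kiểm tra các cột
--     for j in range(len(board[0])):
--         col = [board[i][j] for i in range(len(board))]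
--         score += score_of_list(col, computer) - score_of_list(col, human)
--     # Kiểm tra các đường chéo chính
--     for k in range(-len(board) + 5, len(board[0]) - 4):
--         diag = [board[i][i + k] for i in range(len(board)) if 0 <= i + k < len(board[0])]
--         score += score_of_list(diag, computer) - score_of_list(diag, human)
--     # Kiểm tra các đường chéo phụ
--     for k in range(-len(board) + 5, len(board[0]) - 4):
--         diag = [board[i][len(board[0]) - 1 - i - k] for i in range(len(board)) if 0 <= len(board[0]) - 1 - i - k < len(board[0])]
--         score += score_of_list(diag, computer) - score_of_list(diag, human)
--     return score
-- ===== SOURCE B (Python) =====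
-- def score_of_list(lis, col):
--     blank = lis.count(" ")
--     filled = lis.count(col)
--
--     if blank + filled < 5:
--         return -1
--     elif blank == 5:
--         return 0
--     else:
--         return filled
--
-- def evaluate(board, computer, human):
--     # One pass over the cells, grouping them into lines keyed by
--     # (0, j) = column j, (1, j - i) = main diagonal, (2, i + j) = anti-diagonal;
--     # rows are scored directly during the same pass.
--     n = len(board)
--     m = len(board[0])
--     total = 0
--     groups = {}
--     for i, row in enumerate(board):
--         total += score_of_list(row, computer) - score_of_list(row, human)
--         for j in range(m):
--             v = row[j]
--             for key in ((0, j), (1, j - i), (2, i + j)):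
--                 groups.setdefault(key, []).append(v)
--     for j in range(m):
--         line = groups.get((0, j), [])
--         total += score_of_list(line, computer) - score_of_list(line, human)
--     for k in range(-n + 5, m - 4):
--         diag = groups.get((1, k), [])
--         total += score_of_list(diag, computer) - score_of_list(diag, human)
--         anti = groups.get((2, m - 1 - k), [])
--         total += score_of_list(anti, computer) - score_of_list(anti, human)
--     return total
-- ===== Notes on version B (the rewrite author's own statement) =====
-- stated objective: alternative
-- what changed: Instead of re-scanning the board with a fresh list comprehension for every column and every diagonal, B makes a single pass over the cells, grouping them into lines in a dictionary keyed by (column j), (main diagonal j-i) and (anti-diagonal i+j), and then scores the grouped lines; rows are scored directly during the same pass.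
import Mathlib
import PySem

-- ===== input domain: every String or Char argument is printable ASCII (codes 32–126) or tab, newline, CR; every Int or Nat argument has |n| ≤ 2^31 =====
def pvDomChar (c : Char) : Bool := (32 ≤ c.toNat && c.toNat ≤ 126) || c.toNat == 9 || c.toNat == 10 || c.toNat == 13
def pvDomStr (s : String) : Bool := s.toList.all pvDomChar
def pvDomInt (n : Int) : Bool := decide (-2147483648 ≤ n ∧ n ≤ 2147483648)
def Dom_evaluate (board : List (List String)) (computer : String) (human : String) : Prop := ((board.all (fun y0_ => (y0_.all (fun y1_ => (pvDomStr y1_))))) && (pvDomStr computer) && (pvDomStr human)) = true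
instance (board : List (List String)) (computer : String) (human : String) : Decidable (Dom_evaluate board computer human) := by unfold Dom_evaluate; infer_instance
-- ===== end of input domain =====

-- B replaces A's repeated per-line comprehension scans by one pass over the cells that groups
-- them into lines in a dictionary keyed by column / diagonal / anti-diagonal (objective: alternative).

-- shared helper of both Python files (identical code in Source A and Source B)
def score_of_list (lis : List String) (col : String) : Int :=
  let blank : Int := PySem.List.count lis " "
  let filled : Int := PySem.List.count lis col
  if blank + filled < 5 then -1
  else if blank = 5 then 0
  else filled

-- ===== PORT A =====
def evaluate (board : List (List String)) (computer : String) (human : String) : Int :=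
  let n : Int := PySem.List.len board
  let m : Int := PySem.List.len (PySem.List.pyGetD board 0 [])
  let s1 := (PySem.List.pyRange 0 n).foldl (fun score i =>
      let row := PySem.List.pyGetD board i []
      score + (score_of_list row computer - score_of_list row human)) 0
  let s2 := (PySem.List.pyRange 0 m).foldl (fun score j =>
      let col := (PySem.List.pyRange 0 n).map
        (fun i => PySem.List.pyGetD (PySem.List.pyGetD board i []) j "")
      score + (score_of_list col computer - score_of_list col human)) s1
  let s3 := (PySem.List.pyRange (-n + 5) (m - 4)).foldl (fun score k =>
      let diag := ((PySem.List.pyRange 0 n).filter (fun i => decide (0 ≤ i + k ∧ i + k < m))).map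
        (fun i => PySem.List.pyGetD (PySem.List.pyGetD board i []) (i + k) "")
      score + (score_of_list diag computer - score_of_list diag human)) s2
  let s4 := (PySem.List.pyRange (-n + 5) (m - 4)).foldl (fun score k =>
      let diag := ((PySem.List.pyRange 0 n).filter
          (fun i => decide (0 ≤ m - 1 - i - k ∧ m - 1 - i - k < m))).map
        (fun i => PySem.List.pyGetD (PySem.List.pyGetD board i []) (m - 1 - i - k) "")
      score + (score_of_list diag computer - score_of_list diag human)) s3
  s4

-- ===== PORT B =====
def evaluate_alt (board : List (List String)) (computer : String) (human : String) : Int :=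
  let n : Int := PySem.List.len board
  let m : Int := PySem.List.len (PySem.List.pyGetD board 0 [])
  let st := (PySem.List.enumerate board).foldl
    (fun (st : Int × PySem.Dict (Int × Int) (List String)) p =>
      (st.1 + (score_of_list p.2 computer - score_of_list p.2 human),
       (PySem.List.pyRange 0 m).foldl (fun g j =>
          let v := PySem.List.pyGetD p.2 j ""
          ((g.modify (0, j) [] (· ++ [v])).modify (1, j - p.1) [] (· ++ [v])).modify
            (2, p.1 + j) [] (· ++ [v])) st.2))
    (0, PySem.Dict.empty)
  let groups := st.2
  let t1 := (PySem.List.pyRange 0 m).foldl (fun total j =>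
      let line := groups.getD (0, j) []
      total + (score_of_list line computer - score_of_list line human)) st.1
  let t2 := (PySem.List.pyRange (-n + 5) (m - 4)).foldl (fun total k =>
      let diag := groups.getD (1, k) []
      let anti := groups.getD (2, m - 1 - k) []
      total + (score_of_list diag computer - score_of_list diag human)
            + (score_of_list anti computer - score_of_list anti human)) t1
  t2

-- ===== PRECONDITION & SPEC =====
-- Pre_: exactly the inputs where Python A returns normally — a non-empty board whose rows all
-- have at least len(board[0]) cells (otherwise A raises IndexError on board[0] or board[i][j]).
def Pre_evaluate (board : List (List String)) (computer : String) (human : String) : Prop :=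
  board ≠ [] ∧ ∀ row ∈ board, (board.headD []).length ≤ row.length
instance (board : List (List String)) (computer : String) (human : String) : Decidable (Pre_evaluate board computer human) := by unfold Pre_evaluate; infer_instance

def pvWitness_evaluate : List (List String) × String × String :=
  ([[" ", " ", " ", " ", " "],
    [" ", "x", " ", " ", " "],
    [" ", " ", "o", " ", " "],
    [" ", " ", " ", "x", " "],
    [" ", " ", " ", " ", " "]], "x", "o")

def Spec_evaluate (board : List (List String)) (computer : String) (human : String) (out : Int) : Prop := out = evaluate_alt board computer human
instance (board : List (List String)) (computer : String) (human : String) (out : Int) : Decidable (Spec_evaluate board computer human out) := by unfold Spec_evaluate; infer_instance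

-- ===== CLAIM (what is proved, stated in full; the proofs are below) =====
def Claim_equal_evaluate : Prop := ∀ (board : List (List String)) (computer : String) (human : String), Dom_evaluate board computer human → Pre_evaluate board computer human → Spec_evaluate board computer human (evaluate board computer human)

-- ===== LEMMAS AND PROOFS =====

-- the inner j-index whose cell row[j] feeds the group keyed K, for the row at index i
def hitJ (K : Int × Int) (i : Int) : Option Int :=
  if K.1 = 0 then some K.2
  else if K.1 = 1 then some (K.2 + i)
  else if K.1 = 2 then some (K.2 - i)
  else none

-- one cell of B's single pass: the three dictionary updates done for cell (i, j)
def cellStep (i : Int) (row : List String)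
    (g : PySem.Dict (Int × Int) (List String)) (j : Int) :
    PySem.Dict (Int × Int) (List String) :=
  let v := PySem.List.pyGetD row j ""
  ((g.modify (0, j) [] (· ++ [v])).modify (1, j - i) [] (· ++ [v])).modify
    (2, i + j) [] (· ++ [v])

-- B's grouping dictionary, as a standalone function of the board
def groupsOf (board : List (List String)) (m : Int) : PySem.Dict (Int × Int) (List String) :=
  (PySem.List.enumerate board).foldl
    (fun g p => (PySem.List.pyRange 0 m).foldl (cellStep p.1 p.2) g) PySem.Dict.empty

theorem cellStep_getD (K : Int × Int) (i : Int) (row : List String)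
    (g : PySem.Dict (Int × Int) (List String)) (j : Int) :
    (cellStep i row g j).getD K [] =
      g.getD K [] ++ (if hitJ K i = some j then [PySem.List.pyGetD row j ""] else []) := by
  obtain ⟨t, x⟩ := K
  unfold cellStep hitJ
  simp only []
  by_cases h2 : (t, x) = ((2 : Int), i + j)
  · simp only [Prod.mk.injEq] at h2
    obtain ⟨rfl, rfl⟩ := h2
    rw [PySem.Dict.getD_modify_self,
      PySem.Dict.getD_modify_of_ne _ _ _ (by simp : ((2 : Int), i + j) ≠ (1, j - i)),
      PySem.Dict.getD_modify_of_ne _ _ _ (by simp : ((2 : Int), i + j) ≠ (0, j))]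
    rw [if_pos (by simp)]
  · rw [PySem.Dict.getD_modify_of_ne _ _ _ h2]
    by_cases h1 : (t, x) = ((1 : Int), j - i)
    · simp only [Prod.mk.injEq] at h1
      obtain ⟨rfl, rfl⟩ := h1
      rw [PySem.Dict.getD_modify_self,
        PySem.Dict.getD_modify_of_ne _ _ _ (by simp : ((1 : Int), j - i) ≠ (0, j))]
      rw [if_pos (by norm_num)]
    · rw [PySem.Dict.getD_modify_of_ne _ _ _ h1]
      by_cases h0 : (t, x) = ((0 : Int), j)
      · simp only [Prod.mk.injEq] at h0
        obtain ⟨rfl, rfl⟩ := h0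
        rw [PySem.Dict.getD_modify_self, if_pos (by norm_num)]
      · rw [PySem.Dict.getD_modify_of_ne _ _ _ h0]
        have : ¬ ((if t = 0 then some x else if t = 1 then some (x + i)
            else if t = 2 then some (x - i) else none) = some j) := by
          simp only [Prod.mk.injEq] at h0 h1 h2
          split_ifs with a b c <;> simp <;> omega
        rw [if_neg this, List.append_nil]

theorem foldl_cellStep_getD (K : Int × Int) (i : Int) (row : List String) :
    ∀ (js : List Int) (g : PySem.Dict (Int × Int) (List String)),
      ((js.foldl (cellStep i row) g).getD K []) =
        g.getD K [] ++ js.flatMap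
          (fun j => if hitJ K i = some j then [PySem.List.pyGetD row j ""] else []) := by
  intro js
  induction js with
  | nil => simp
  | cons j js ih =>
    intro g
    rw [List.foldl_cons, ih, cellStep_getD, List.flatMap_cons, List.append_assoc]

theorem rowsFold_getD (K : Int × Int) (m : Int) :
    ∀ (ps : List (Int × List String)) (g : PySem.Dict (Int × Int) (List String)),
      ((ps.foldl (fun g p => (PySem.List.pyRange 0 m).foldl (cellStep p.1 p.2) g) g).getD K []) =
        g.getD K [] ++ ps.flatMap (fun p => (PySem.List.pyRange 0 m).flatMap
          (fun j => if hitJ K p.1 = some j then [PySem.List.pyGetD p.2 j ""] else [])) := by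
  intro ps
  induction ps with
  | nil => simp
  | cons p ps ih =>
    intro g
    rw [List.foldl_cons, ih, foldl_cellStep_getD, List.flatMap_cons, List.append_assoc]

-- pick the unique matching element out of a duplicate-free index list
theorem flatMap_pick {α : Type} (f : Int → List α) (j0 : Int) :
    ∀ (l : List Int), l.Nodup →
      l.flatMap (fun j => if j0 = j then f j else []) =
        if j0 ∈ l then f j0 else [] := by
  intro l
  induction l with
  | nil => simp
  | cons a l ih =>
    intro h
    rw [List.nodup_cons] at h
    simp only [List.flatMap_cons]
    by_cases ha : j0 = a
    · subst ha
      rw [ih h.2]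
      simp [h.1]
    · rw [ih h.2]
      simp [ha]

theorem filter_map_eq_flatMap {α β : Type} (p : α → Bool) (f : α → β) (l : List α) :
    (l.filter p).map f = l.flatMap (fun x => if p x then [f x] else []) := by
  induction l with
  | nil => rfl
  | cons a l ih =>
    simp only [List.filter_cons, List.flatMap_cons, ← ih]
    by_cases h : p a <;> simp [h]

theorem groups_col (board : List (List String)) (m j : Int) (hj : j ∈ PySem.List.pyRange 0 m) :
    (groupsOf board m).getD (0, j) [] =
      (PySem.List.pyRange 0 (PySem.List.len board)).map
        (fun i => PySem.List.pyGetD (PySem.List.pyGetD board i []) j "") := by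
  rw [groupsOf, rowsFold_getD]
  have h1 : ∀ p ∈ PySem.List.enumerate board,
      (PySem.List.pyRange 0 m).flatMap
        (fun j' => if hitJ (0, j) p.1 = some j' then [PySem.List.pyGetD p.2 j' ""] else [])
      = [PySem.List.pyGetD p.2 j ""] := by
    intro p _
    rw [List.flatMap_congr (g := fun j' => if j = j' then [PySem.List.pyGetD p.2 j' ""] else [])
        (by intro j' _; simp [hitJ]),
      flatMap_pick _ _ _ (PySem.List.nodup_pyRange_one 0 m), if_pos hj]
  rw [List.flatMap_congr h1, ← List.map_eq_flatMap,
    show (fun p : Int × List String => PySem.List.pyGetD p.2 j "")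
      = (fun row => PySem.List.pyGetD row j "") ∘ Prod.snd from rfl,
    ← List.map_map, PySem.List.map_snd_enumerate,
    show (fun i => PySem.List.pyGetD (PySem.List.pyGetD board i []) j "")
      = (fun row => PySem.List.pyGetD row j "") ∘ (fun i => PySem.List.pyGetD board i []) from rfl,
    ← List.map_map, PySem.List.map_pyGetD_pyRange_zero]
  exact List.nil_append _

theorem groups_diag (board : List (List String)) (m k : Int) :
    (groupsOf board m).getD (1, k) [] =
      ((PySem.List.pyRange 0 (PySem.List.len board)).filter
          (fun i => decide (0 ≤ i + k ∧ i + k < m))).map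
        (fun i => PySem.List.pyGetD (PySem.List.pyGetD board i []) (i + k) "") := by
  rw [groupsOf, rowsFold_getD, filter_map_eq_flatMap]
  have h1 : ∀ p ∈ PySem.List.enumerate board,
      (PySem.List.pyRange 0 m).flatMap
        (fun j' => if hitJ (1, k) p.1 = some j' then [PySem.List.pyGetD p.2 j' ""] else [])
      = if k + p.1 ∈ PySem.List.pyRange 0 m then [PySem.List.pyGetD p.2 (k + p.1) ""] else [] := by
    intro p _
    rw [List.flatMap_congr (g := fun j' => if k + p.1 = j' then [PySem.List.pyGetD p.2 j' ""] else [])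
        (by intro j' _; simp [hitJ]),
      flatMap_pick _ _ _ (PySem.List.nodup_pyRange_one 0 m)]
  rw [List.flatMap_congr h1, PySem.List.enumerate_eq_map_pyRange board ([] : List String),
    List.flatMap_map]
  rw [List.flatMap_congr (g := fun i =>
      if decide (0 ≤ i + k ∧ i + k < m) = true
      then [PySem.List.pyGetD (PySem.List.pyGetD board i []) (i + k) ""] else [])
    (by intro i _; rw [Int.add_comm k i]; simp [PySem.List.mem_pyRange_one])]
  exact List.nil_append _

theorem groups_anti (board : List (List String)) (m k : Int) :
    (groupsOf board m).getD (2, m - 1 - k) [] =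
      ((PySem.List.pyRange 0 (PySem.List.len board)).filter
          (fun i => decide (0 ≤ m - 1 - i - k ∧ m - 1 - i - k < m))).map
        (fun i => PySem.List.pyGetD (PySem.List.pyGetD board i []) (m - 1 - i - k) "") := by
  rw [groupsOf, rowsFold_getD, filter_map_eq_flatMap]
  have h1 : ∀ p ∈ PySem.List.enumerate board,
      (PySem.List.pyRange 0 m).flatMap
        (fun j' => if hitJ (2, m - 1 - k) p.1 = some j' then [PySem.List.pyGetD p.2 j' ""] else [])
      = if m - 1 - k - p.1 ∈ PySem.List.pyRange 0 m
        then [PySem.List.pyGetD p.2 (m - 1 - k - p.1) ""] else [] := by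
    intro p _
    rw [List.flatMap_congr (g := fun j' =>
        if m - 1 - k - p.1 = j' then [PySem.List.pyGetD p.2 j' ""] else [])
        (by intro j' _; simp [hitJ]),
      flatMap_pick _ _ _ (PySem.List.nodup_pyRange_one 0 m)]
  rw [List.flatMap_congr h1, PySem.List.enumerate_eq_map_pyRange board ([] : List String),
    List.flatMap_map]
  rw [List.flatMap_congr (g := fun i =>
      if decide (0 ≤ m - 1 - i - k ∧ m - 1 - i - k < m) = true
      then [PySem.List.pyGetD (PySem.List.pyGetD board i []) (m - 1 - i - k) ""] else [])
    (by intro i _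
        have e : m - 1 - k - i = m - 1 - i - k := by ring
        rw [e]; simp [PySem.List.mem_pyRange_one])]
  exact List.nil_append _

theorem evaluate_spec' : ∀ (board : List (List String)) (computer : String) (human : String),
    evaluate board computer human = evaluate_alt board computer human := by
  intro board computer human
  simp only [evaluate, evaluate_alt]
  have hcell : ∀ (i : Int) (row : List String),
      (fun (g : PySem.Dict (Int × Int) (List String)) (j : Int) =>
        let v := PySem.List.pyGetD row j ""
        ((g.modify (0, j) [] (· ++ [v])).modify (1, j - i) [] (· ++ [v])).modify
          (2, i + j) [] (· ++ [v])) = cellStep i row := fun _ _ => rfl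
  simp only [hcell]
  rw [PySem.List.foldl_prod_mk
    (fun t (p : Int × List String) =>
      t + (score_of_list p.2 computer - score_of_list p.2 human))
    (fun d (p : Int × List String) =>
      List.foldl (cellStep p.1 p.2) d
        (PySem.List.pyRange 0 (PySem.List.len (PySem.List.pyGetD board 0 []))))
    (PySem.List.enumerate board) 0 PySem.Dict.empty]
  rw [show List.foldl
      (fun (d : PySem.Dict (Int × Int) (List String)) (p : Int × List String) =>
        List.foldl (cellStep p.1 p.2) d
          (PySem.List.pyRange 0 (PySem.List.len (PySem.List.pyGetD board 0 []))))
      PySem.Dict.empty (PySem.List.enumerate board)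
      = groupsOf board (PySem.List.len (PySem.List.pyGetD board 0 [])) from rfl]
  dsimp only
  have hassoc : ∀ (f g : Int → Int),
      (fun (total : Int) (k : Int) => total + f k + g k)
      = (fun (total : Int) (k : Int) => total + (f k + g k)) := by
    intro f g; funext t k; ring
  simp only [hassoc]
  simp only [PySem.List.foldl_add]
  simp only [PySem.List.sum_map_add_int]
  have hrow : List.map (fun (x : Int × List String) => score_of_list x.2 computer - score_of_list x.2 human) (PySem.List.enumerate board)
      = List.map (fun x => score_of_list (PySem.List.pyGetD board x []) computer - score_of_list (PySem.List.pyGetD board x []) human) (PySem.List.pyRange 0 (PySem.List.len board)) := by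
    rw [PySem.List.enumerate_eq_map_pyRange board ([] : List String), List.map_map]
    rfl
  have hcol : List.map (fun x => score_of_list ((groupsOf board (PySem.List.len (PySem.List.pyGetD board 0 []))).getD (0, x) []) computer - score_of_list ((groupsOf board (PySem.List.len (PySem.List.pyGetD board 0 []))).getD (0, x) []) human) (PySem.List.pyRange 0 (PySem.List.len (PySem.List.pyGetD board 0 [])))
      = List.map (fun x => score_of_list (List.map (fun i => PySem.List.pyGetD (PySem.List.pyGetD board i []) x "") (PySem.List.pyRange 0 (PySem.List.len board))) computer - score_of_list (List.map (fun i => PySem.List.pyGetD (PySem.List.pyGetD board i []) x "") (PySem.List.pyRange 0 (PySem.List.len board))) human) (PySem.List.pyRange 0 (PySem.List.len (PySem.List.pyGetD board 0 []))) :=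
    List.map_congr_left (fun j hj => by rw [groups_col board _ j hj])
  have hdiag : List.map (fun x => score_of_list ((groupsOf board (PySem.List.len (PySem.List.pyGetD board 0 []))).getD (1, x) []) computer - score_of_list ((groupsOf board (PySem.List.len (PySem.List.pyGetD board 0 []))).getD (1, x) []) human) (PySem.List.pyRange (-PySem.List.len board + 5) (PySem.List.len (PySem.List.pyGetD board 0 []) - 4))
      = List.map (fun x => score_of_list (List.map (fun i => PySem.List.pyGetD (PySem.List.pyGetD board i []) (i + x) "") (List.filter (fun i => decide (0 ≤ i + x ∧ i + x < PySem.List.len (PySem.List.pyGetD board 0 []))) (PySem.List.pyRange 0 (PySem.List.len board)))) computer - score_of_list (List.map (fun i => PySem.List.pyGetD (PySem.List.pyGetD board i []) (i + x) "") (List.filter (fun i => decide (0 ≤ i + x ∧ i + x < PySem.List.len (PySem.List.pyGetD board 0 []))) (PySem.List.pyRange 0 (PySem.List.len board)))) human) (PySem.List.pyRange (-PySem.List.len board + 5) (PySem.List.len (PySem.List.pyGetD board 0 []) - 4)) :=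
    List.map_congr_left (fun k _ => by rw [groups_diag board (PySem.List.len (PySem.List.pyGetD board 0 [])) k])
  have hanti : List.map (fun x => score_of_list ((groupsOf board (PySem.List.len (PySem.List.pyGetD board 0 []))).getD (2, PySem.List.len (PySem.List.pyGetD board 0 []) - 1 - x) []) computer - score_of_list ((groupsOf board (PySem.List.len (PySem.List.pyGetD board 0 []))).getD (2, PySem.List.len (PySem.List.pyGetD board 0 []) - 1 - x) []) human) (PySem.List.pyRange (-PySem.List.len board + 5) (PySem.List.len (PySem.List.pyGetD board 0 []) - 4))
      = List.map (fun x => score_of_list (List.map (fun i => PySem.List.pyGetD (PySem.List.pyGetD board i []) (PySem.List.len (PySem.List.pyGetD board 0 []) - 1 - i - x) "") (List.filter (fun i => decide (0 ≤ PySem.List.len (PySem.List.pyGetD board 0 []) - 1 - i - x ∧ PySem.List.len (PySem.List.pyGetD board 0 []) - 1 - i - x < PySem.List.len (PySem.List.pyGetD board 0 []))) (PySem.List.pyRange 0 (PySem.List.len board)))) computer - score_of_list (List.map (fun i => PySem.List.pyGetD (PySem.List.pyGetD board i []) (PySem.List.len (PySem.List.pyGetD board 0 []) - 1 - i - x) "")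 (List.filter (fun i => decide (0 ≤ PySem.List.len (PySem.List.pyGetD board 0 []) - 1 - i - x ∧ PySem.List.len (PySem.List.pyGetD board 0 []) - 1 - i - x < PySem.List.len (PySem.List.pyGetD board 0 []))) (PySem.List.pyRange 0 (PySem.List.len board)))) human) (PySem.List.pyRange (-PySem.List.len board + 5) (PySem.List.len (PySem.List.pyGetD board 0 []) - 4)) :=
    List.map_congr_left (fun k _ => by rw [groups_anti board (PySem.List.len (PySem.List.pyGetD board 0 [])) k])
  rw [hrow, hcol, hdiag, hanti]
  ring

-- ===== VERDICT (by name: the statement is the Claim_ definition above) =====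
theorem evaluate_spec : Claim_equal_evaluate := by
  intro board computer human _ _
  unfold Spec_evaluate
  exact evaluate_spec' board computer human
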